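-- pv_equiv track=rewrite | github.com/unesmu/SP-learning-hamiltonian-functions-from-data | furuta_pendulum/src/train.py | generate_multi_level_list_conf2
-- ===== SOURCE A (Python) =====
-- def generate_multi_level_list_conf2(length=17, num_lists=4):
--     """
--     This function generates lists of decreasing size containing which resnets should be active
--     for the multilevel strategy
--
--     Example output for default parameters:
--     >>>
--     >>>
--     >>>
--     """
--     largest_list = list(range(length))
--     all_lists = [largest_list]
--     prev_list = largest_list
--     for j in range(num_lists):
--         new_list = []
--         for i, elem in enumerate(prev_list):
--             if not i % 2 and i < len(prev_list):
--                 new_list.append(elem)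
--             if i == len(prev_list) - 1:
--                 all_lists.append(new_list)
--                 prev_list = new_list
--     return all_lists
-- ===== SOURCE B (Python) =====
-- def generate_multi_level_list_conf2(length=17, num_lists=4):
--     """Closed-form levels: level k is range(0, length, stride) with the stride doubling
--     per level (capped once it reaches length: larger strides select index 0 only).
--     An empty base list has no elements to thin out, so it is the only level."""
--     base = list(range(length))
--     if not base:
--         return [base]
--     levels = [base]
--     stride = 1
--     for _ in range(num_lists):
--         if stride < length:
--             stride *= 2
--         levels.append(list(range(0, length, stride)))
--     return levels
-- ===== Notes on version B (the rewrite author's own statement) =====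
-- stated objective: alternative
-- what changed: Each level is computed directly as range(0, length, stride) with a stride that doubles per level (capped once it reaches length), instead of A's chained prev_list with a per-element enumerate/append filtering inner loop; an empty base list is returned as the only level up front.
import Mathlib
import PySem

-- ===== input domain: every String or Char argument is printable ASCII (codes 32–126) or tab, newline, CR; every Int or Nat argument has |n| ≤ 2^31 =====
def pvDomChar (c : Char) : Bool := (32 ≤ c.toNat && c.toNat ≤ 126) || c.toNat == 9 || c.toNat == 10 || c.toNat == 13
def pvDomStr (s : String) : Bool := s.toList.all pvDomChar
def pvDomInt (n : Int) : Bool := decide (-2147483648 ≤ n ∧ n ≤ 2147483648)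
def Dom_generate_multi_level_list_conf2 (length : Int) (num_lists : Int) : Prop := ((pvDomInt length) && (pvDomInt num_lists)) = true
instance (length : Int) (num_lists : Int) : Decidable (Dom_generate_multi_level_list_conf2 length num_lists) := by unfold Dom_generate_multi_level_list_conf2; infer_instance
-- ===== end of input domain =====

-- B computes each level directly as range(0, length, stride) with a doubling (length-capped) stride,
-- removing A's chained prev_list and its per-element enumerate/append inner loop (alternative algorithm).


-- ===== PORT A =====
def generate_multi_level_list_conf2 (length : Int) (num_lists : Int) : List (List Int) :=
  let largest_list : List Int := PySem.List.pyRange 0 length 1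
  let all_lists : List (List Int) := [largest_list]
  let prev_list : List Int := largest_list
  -- for j in range(num_lists): state = (all_lists, prev_list)
  let st :=
    (PySem.List.pyRange 0 num_lists 1).foldl
      (fun (st : List (List Int) × List Int) _j =>
        -- for i, elem in enumerate(prev_list): state = (new_list, all_lists, prev_list)
        let inner :=
          (PySem.List.enumerate st.2).foldl
            (fun (s : List Int × List (List Int) × List Int) ie =>
              let s1 : List Int :=
                if PySem.Int.mod ie.1 2 = 0 ∧ ie.1 < PySem.List.len s.2.2 then s.1 ++ [ie.2] else s.1
              if ie.1 = PySem.List.len s.2.2 - 1 then (s1, s.2.1 ++ [s1], s1)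
              else (s1, s.2.1, s.2.2))
            (([] : List Int), st.1, st.2)
        (inner.2.1, inner.2.2))
      (all_lists, prev_list)
  st.1

-- ===== PORT B =====
def generate_multi_level_list_conf2_alt (length : Int) (num_lists : Int) : List (List Int) :=
  let base := PySem.List.pyRange 0 length 1
  if base = [] then [base]
  else
    -- levels = [base]; stride = 1
    -- for _ in range(num_lists): if stride < length: stride *= 2; levels.append(list(range(0, length, stride)))
    let st :=
      (PySem.List.pyRange 0 num_lists 1).foldl
        (fun (st : List (List Int) × Int) _j =>
          let stride := if st.2 < length then st.2 * 2 else st.2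
          (st.1 ++ [PySem.List.pyRange 0 length stride], stride))
        ([base], 1)
    st.1

-- ===== PRECONDITION & SPEC =====
def Spec_generate_multi_level_list_conf2 (length : Int) (num_lists : Int) (out : List (List Int)) : Prop := out = generate_multi_level_list_conf2_alt length num_lists
instance (length : Int) (num_lists : Int) (out : List (List Int)) : Decidable (Spec_generate_multi_level_list_conf2 length num_lists out) := by unfold Spec_generate_multi_level_list_conf2; infer_instance

-- ===== CLAIM (what is proved, stated in full; the proofs are below) =====
def Claim_equal_generate_multi_level_list_conf2 : Prop := ∀ (length : Int) (num_lists : Int), Dom_generate_multi_level_list_conf2 length num_lists → Spec_generate_multi_level_list_conf2 length num_lists (generate_multi_level_list_conf2 length num_lists)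

-- ===== LEMMAS AND PROOFS =====

-- the elements of l at even positions, counting positions from j
def pvEvensFrom (j : Nat) : List Int → List Int
  | [] => []
  | x :: t => if j % 2 = 0 then x :: pvEvensFrom (j + 1) t else pvEvensFrom (j + 1) t

-- A's inner loop body (definitionally the lambda in the port)
def pvIStep (s : List Int × List (List Int) × List Int) (ie : Int × Int) :
    List Int × List (List Int) × List Int :=
  let s1 : List Int :=
    if PySem.Int.mod ie.1 2 = 0 ∧ ie.1 < PySem.List.len s.2.2 then s.1 ++ [ie.2] else s.1
  if ie.1 = PySem.List.len s.2.2 - 1 then (s1, s.2.1 ++ [s1], s1)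
  else (s1, s.2.1, s.2.2)

-- A's outer loop body (definitionally the lambda in the port)
def pvStep (st : List (List Int) × List Int) (_j : Int) : List (List Int) × List Int :=
  let inner := (PySem.List.enumerate st.2).foldl pvIStep (([] : List Int), st.1, st.2)
  (inner.2.1, inner.2.2)

lemma pvA_eq (length num_lists : Int) :
    generate_multi_level_list_conf2 length num_lists
      = ((PySem.List.pyRange 0 num_lists 1).foldl pvStep
          ([PySem.List.pyRange 0 length 1], PySem.List.pyRange 0 length 1)).1 := rfl

lemma pvEvensFrom_add_two : ∀ (l : List Int) (j : Nat), pvEvensFrom (j + 2) l = pvEvensFrom j l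
  | [], _ => rfl
  | x :: t, j => by
      have h : (j + 2) % 2 = j % 2 := by omega
      rw [pvEvensFrom, pvEvensFrom, h, show j + 2 + 1 = j + 1 + 2 from by omega,
        pvEvensFrom_add_two t (j + 1)]

lemma pvIStep_eq (new : List Int) (all : List (List Int)) (prev : List Int) (j : Nat) (x : Int)
    (hlt : j < prev.length) :
    pvIStep (new, all, prev) ((j : Int), x) =
      if j + 1 = prev.length then
        ((if j % 2 = 0 then new ++ [x] else new),
         all ++ [if j % 2 = 0 then new ++ [x] else new],
         (if j % 2 = 0 then new ++ [x] else new))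
      else ((if j % 2 = 0 then new ++ [x] else new), all, prev) := by
  have hm : PySem.Int.mod ((j : Int)) 2 = ((j % 2 : Nat) : Int) := by
    exact_mod_cast PySem.Int.mod_natCast j 2
  have hC : (PySem.Int.mod ((j : Int)) 2 = 0 ∧ ((j : Int)) < PySem.List.len prev) ↔ j % 2 = 0 := by
    rw [hm, PySem.List.len_eq]; omega
  have hD : (((j : Int)) = PySem.List.len prev - 1) ↔ j + 1 = prev.length := by
    rw [PySem.List.len_eq]; omega
  simp only [pvIStep]
  rw [if_congr hC rfl rfl, if_congr hD rfl rfl]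

lemma pvInner_aux : ∀ (rest : List Int) (j : Nat) (prev new : List Int) (all : List (List Int)),
    rest ≠ [] → j + rest.length = prev.length →
    (PySem.List.enumerate rest (j : Int)).foldl pvIStep (new, all, prev)
      = (new ++ pvEvensFrom j rest, all ++ [new ++ pvEvensFrom j rest], new ++ pvEvensFrom j rest) := by
  intro rest
  induction rest with
  | nil => intro _ _ _ _ h _; exact absurd rfl h
  | cons x t ih =>
    intro j prev new all _ hlen
    simp only [List.length_cons] at hlen
    simp only [PySem.List.enumerate_cons, List.foldl_cons]
    rw [pvIStep_eq new all prev j x (by omega)]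
    cases t with
    | nil =>
      rw [if_pos (by simp at hlen ⊢; omega)]
      simp only [PySem.List.enumerate_nil, List.foldl_nil]
      by_cases hp : j % 2 = 0 <;> simp [pvEvensFrom, hp]
    | cons y t' =>
      rw [if_neg (by simp at hlen ⊢; omega)]
      have hcast : ((j : Int) + 1) = ((j + 1 : Nat) : Int) := by push_cast; ring
      rw [hcast, ih (j + 1) prev _ all (by simp) (by simp at hlen ⊢; omega)]
      by_cases hp : j % 2 = 0 <;> simp [pvEvensFrom, hp]

lemma pvStep_spec (all : List (List Int)) (prev : List Int) (x : Int) (h : prev ≠ []) :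
    pvStep (all, prev) x = (all ++ [pvEvensFrom 0 prev], pvEvensFrom 0 prev) := by
  have h0 : ((0 : Nat) : Int) = 0 := rfl
  have := pvInner_aux prev 0 prev [] all h (by simp)
  rw [h0] at this
  simp [pvStep, this]

lemma pvStep_nil (all : List (List Int)) (x : Int) :
    pvStep (all, ([] : List Int)) x = (all, []) := by
  simp [pvStep, PySem.List.enumerate_nil]

lemma pvRange_pos_cons (a b s : Int) (hs : 0 < s) (hab : a < b) :
    PySem.List.pyRange a b s = a :: PySem.List.pyRange (a + s) b s := by
  rw [PySem.List.pyRange_of_pos a b hs, PySem.List.pyRange_of_pos (a + s) b hs]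
  have hq0 : 0 ≤ (b - a - 1) / s := Int.ediv_nonneg (by omega) (by omega)
  have hcount : (b - a + s - 1) / s = (b - a - 1) / s + 1 := by
    have h1 : b - a + s - 1 = (b - a - 1) + 1 * s := by ring
    rw [h1, Int.add_mul_ediv_right _ _ (by omega : s ≠ 0)]
  have hcount' : (if a < b then ((b - a + s - 1) / s).toNat else 0)
      = (if a + s < b then ((b - (a + s) + s - 1) / s).toNat else 0) + 1 := by
    rw [if_pos hab, hcount]
    by_cases h2 : a + s < b
    · rw [if_pos h2]
      have : b - (a + s) + s - 1 = b - a - 1 := by ring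
      rw [this]; omega
    · rw [if_neg h2]
      have : (b - a - 1) / s = 0 := Int.ediv_eq_zero_of_lt (by omega) (by omega)
      omega
  rw [hcount']
  rw [List.range_succ_eq_map, List.map_cons, List.map_map]
  congr 1
  · simp
  · apply List.map_congr_left; intro k _
    simp only [Function.comp_apply]; push_cast; ring

lemma pvRange_pos_nil (a b s : Int) (hs : 0 < s) (h : b ≤ a) :
    PySem.List.pyRange a b s = [] := by
  rw [PySem.List.pyRange_of_pos a b hs, if_neg (by omega)]
  simp

lemma pvEvens_pyRange : ∀ (n : Nat) (a b s : Int), 0 < s → (b - a).toNat ≤ n →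
    pvEvensFrom 0 (PySem.List.pyRange a b s) = PySem.List.pyRange a b (2 * s) := by
  intro n
  induction n with
  | zero =>
    intro a b s hs hn
    rw [pvRange_pos_nil a b s hs (by omega), pvRange_pos_nil a b (2 * s) (by omega) (by omega)]
    rfl
  | succ n ih =>
    intro a b s hs hn
    by_cases hab : a < b
    · by_cases h2 : a + s < b
      · rw [pvRange_pos_cons a b s hs hab, pvRange_pos_cons (a + s) b s hs h2,
          pvRange_pos_cons a b (2 * s) (by omega) hab]
        show (if 0 % 2 = 0 then
            ((a : Int) :: pvEvensFrom 1 ((a + s) :: PySem.List.pyRange (a + s + s) b s)) else _) = _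
        rw [if_pos rfl]
        show ((a : Int) :: if 1 % 2 = 0 then _ else pvEvensFrom 2 (PySem.List.pyRange (a + s + s) b s)) = _
        rw [if_neg (by omega)]
        rw [show (2 : Nat) = 0 + 2 from rfl, pvEvensFrom_add_two,
          ih (a + s + s) b s hs (by omega)]
        congr 2
        ring
      · rw [pvRange_pos_cons a b s hs hab, pvRange_pos_nil (a + s) b s hs (by omega),
          pvRange_pos_cons a b (2 * s) (by omega) hab,
          pvRange_pos_nil (a + 2 * s) b (2 * s) (by omega) (by omega)]
        rfl
    · rw [pvRange_pos_nil a b s hs (by omega), pvRange_pos_nil a b (2 * s) (by omega) (by omega)]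
      rfl

lemma pvRange_pos_ne_nil (a b s : Int) (hs : 0 < s) (hab : a < b) :
    PySem.List.pyRange a b s ≠ [] := by
  rw [pvRange_pos_cons a b s hs hab]; exact List.cons_ne_nil _ _

lemma pvEvens_level (L : Int) (k : Nat) :
    pvEvensFrom 0 (PySem.List.pyRange 0 L ((2 : Int) ^ k))
      = PySem.List.pyRange 0 L ((2 : Int) ^ (k + 1)) := by
  rw [pvEvens_pyRange (L - 0).toNat 0 L ((2 : Int) ^ k) (by positivity) (le_refl _)]
  congr 1
  rw [pow_succ]; ring

lemma pvOuter : ∀ (l : List Int) (k : Nat) (acc : List (List Int)) (L : Int), 0 < L →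
    l.foldl pvStep (acc, PySem.List.pyRange 0 L ((2 : Int) ^ k))
      = (acc ++ (List.range l.length).map (fun t => PySem.List.pyRange 0 L ((2 : Int) ^ (k + 1 + t))),
         PySem.List.pyRange 0 L ((2 : Int) ^ (k + l.length))) := by
  intro l
  induction l with
  | nil => intro k acc L _; simp
  | cons x l ih =>
    intro k acc L hL
    rw [List.foldl_cons,
      pvStep_spec acc _ x (pvRange_pos_ne_nil 0 L _ (by positivity) hL),
      pvEvens_level L k, ih (k + 1) _ L hL]
    simp only [Prod.mk.injEq, List.length_cons, List.range_succ_eq_map, List.map_cons,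
      List.map_map, List.append_assoc, List.cons_append, List.nil_append]
    refine ⟨?_, ?_⟩
    · have h0 : k + 1 + 0 = k + 1 := by omega
      have hmap : List.map ((fun t => PySem.List.pyRange 0 L ((2 : Int) ^ (k + 1 + t))) ∘ Nat.succ)
            (List.range l.length)
          = List.map (fun t => PySem.List.pyRange 0 L ((2 : Int) ^ (k + 1 + 1 + t)))
            (List.range l.length) := by
        apply List.map_congr_left; intro t _
        simp only [Function.comp_apply, Nat.succ_eq_add_one]
        rw [show k + 1 + (t + 1) = k + 1 + 1 + t from by omega]
      rw [h0, hmap]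
    · rw [show k + (l.length + 1) = k + 1 + l.length from by omega]

lemma pvA_empty (length num_lists : Int) (hL : length ≤ 0) :
    generate_multi_level_list_conf2 length num_lists = [[]] := by
  rw [pvA_eq, PySem.List.pyRange_one_eq_nil (by omega : length ≤ 0)]
  have : ∀ (l : List Int), l.foldl pvStep ([([] : List Int)], ([] : List Int)) = ([[]], []) := by
    intro l
    induction l with
    | nil => rfl
    | cons x l ih => rw [List.foldl_cons, pvStep_nil, ih]
  rw [this]

-- B's loop body (definitionally the lambda in the port of B)
def pvBStep (length : Int) (st : List (List Int) × Int) (_j : Int) : List (List Int) × Int :=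
  let stride := if st.2 < length then st.2 * 2 else st.2
  (st.1 ++ [PySem.List.pyRange 0 length stride], stride)

lemma pvB_eq (length num_lists : Int) (h : PySem.List.pyRange 0 length 1 ≠ []) :
    generate_multi_level_list_conf2_alt length num_lists
      = ((PySem.List.pyRange 0 num_lists 1).foldl (pvBStep length)
          ([PySem.List.pyRange 0 length 1], 1)).1 := by
  rw [generate_multi_level_list_conf2_alt]
  simp only [if_neg h]
  rfl

lemma pvB_empty (length num_lists : Int) (h : PySem.List.pyRange 0 length 1 = []) :
    generate_multi_level_list_conf2_alt length num_lists = [[]] := by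
  rw [generate_multi_level_list_conf2_alt]
  simp [h]

lemma pvRange_ge (L s : Int) (hL : 0 < L) (hs : 0 < s) (hLs : L ≤ s) :
    PySem.List.pyRange 0 L s = [0] := by
  rw [pvRange_pos_cons 0 L s hs hL, pvRange_pos_nil (0 + s) L s hs (by omega)]

lemma pvB_levels (L : Int) : ∀ (l : List Int) (k : Nat) (acc : List (List Int)) (s : Int),
    0 < L → (s = (2 : Int) ^ k ∨ (L ≤ s ∧ 0 < s ∧ s ≤ (2 : Int) ^ k)) →
    (l.foldl (pvBStep L) (acc, s)).1
      = acc ++ (List.range l.length).map (fun t => PySem.List.pyRange 0 L ((2 : Int) ^ (k + 1 + t))) := by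
  intro l
  induction l with
  | nil => intro k acc s _ _; simp
  | cons x l ih =>
    intro k acc s hL hR
    have hpow : (0 : Int) < 2 ^ k := by positivity
    have hpow1 : (2 : Int) ^ k ≤ 2 ^ (k + 1) := by
      rw [pow_succ]; omega
    have hstep : pvBStep L (acc, s) x
        = (acc ++ [PySem.List.pyRange 0 L (if s < L then s * 2 else s)],
           if s < L then s * 2 else s) := rfl
    have hR' : (if s < L then s * 2 else s) = (2 : Int) ^ (k + 1) ∨
        (L ≤ (if s < L then s * 2 else s) ∧ 0 < (if s < L then s * 2 else s) ∧
         (if s < L then s * 2 else s) ≤ (2 : Int) ^ (k + 1)) := by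
      by_cases hsL : s < L
      · rw [if_pos hsL]
        rcases hR with h | ⟨h1, _⟩
        · left; rw [h, pow_succ]
        · omega
      · rw [if_neg hsL]
        rcases hR with h | ⟨h1, h2, h3⟩
        · right; refine ⟨by omega, by omega, by rw [h]; exact hpow1⟩
        · right; exact ⟨by omega, h2, by omega⟩
    have hlevel : PySem.List.pyRange 0 L (if s < L then s * 2 else s)
        = PySem.List.pyRange 0 L ((2 : Int) ^ (k + 1)) := by
      rcases hR' with h | ⟨h1, h2, h3⟩
      · rw [h]
      · have hpow1' : (0 : Int) < 2 ^ (k + 1) := by positivity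
        rw [pvRange_ge L _ hL h2 h1, pvRange_ge L _ hL hpow1' (by omega)]
    rw [List.foldl_cons, hstep, ih (k + 1) _ _ hL hR', hlevel]
    simp only [List.length_cons, List.range_succ_eq_map, List.map_cons, List.map_map,
      List.append_assoc, List.cons_append, List.nil_append]
    have h0 : k + 1 + 0 = k + 1 := by omega
    have hmap : List.map ((fun t => PySem.List.pyRange 0 L ((2 : Int) ^ (k + 1 + t))) ∘ Nat.succ)
          (List.range l.length)
        = List.map (fun t => PySem.List.pyRange 0 L ((2 : Int) ^ (k + 1 + 1 + t)))
          (List.range l.length) := by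
      apply List.map_congr_left; intro t _
      simp only [Function.comp_apply, Nat.succ_eq_add_one]
      rw [show k + 1 + (t + 1) = k + 1 + 1 + t from by omega]
    rw [h0, hmap]

theorem pv_main (length num_lists : Int) (hL : 0 < length) :
    generate_multi_level_list_conf2 length num_lists
      = generate_multi_level_list_conf2_alt length num_lists := by
  rw [pvA_eq, pvB_eq length num_lists (pvRange_pos_ne_nil 0 length 1 (by omega) hL)]
  have h1 : PySem.List.pyRange 0 length 1 = PySem.List.pyRange 0 length ((2 : Int) ^ (0 : Nat)) := by
    norm_num
  rw [h1, pvOuter (PySem.List.pyRange 0 num_lists 1) 0 _ length hL,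
    pvB_levels length (PySem.List.pyRange 0 num_lists 1) 0 _ 1 hL (Or.inl (by norm_num))]

-- ===== VERDICT (by name: the statement is the Claim_ definition above) =====
theorem generate_multi_level_list_conf2_spec : Claim_equal_generate_multi_level_list_conf2 := by
  intro length num_lists _
  unfold Spec_generate_multi_level_list_conf2
  by_cases hL : 0 < length
  · exact pv_main length num_lists hL
  · have h : PySem.List.pyRange 0 length 1 = [] :=
      PySem.List.pyRange_one_eq_nil (by omega)
    rw [pvA_empty length num_lists (by omega), pvB_empty length num_lists h]
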